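-- pv_equiv track=rewrite | github.com/goncaloevaristo/FP | Projeto 1.py | obter_num_seguranca
-- ===== SOURCE A (Python) =====
-- def obter_num_seguranca(tpl):
--     """
--     Esta função irá receber um tuplo constituído por números e irá retornar a menor diferença entre
--     qualquer par de números.
--     """
--     i, j = 0, 0
--     sub = ()
--     while i != len(tpl):  # percorrer o tuplo de números, escolhendo o primeiro
--         while j != len(tpl):  # voltar a percorrer o tuplo para poder fazer as subtrações
--             subtracao = tpl[i] - tpl[j]
--             if subtracao > 0:
--                 sub = sub + (subtracao,)  # acrescentar o valor da subtração a um novo tuplo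
--             j = j + 1
--         j = 0  # após fazer a subtração para a primeira iteração, voltar ao início da lista
--         i = i + 1  # passar para o próximo número
--     return sorted(sub)[0]  # devolver o número mais pequeno, que deverá ser o primeiro numa lista com ordem crescente
-- ===== SOURCE B (Python) =====
-- def obter_num_seguranca(tpl):
--     s = sorted(tpl)
--     best = None
--     for a, b in zip(s, s[1:]):
--         d = b - a
--         if d > 0:
--             if best is None or d < best:
--                 best = d
--     return best
-- ===== Notes on version B (the rewrite author's own statement) =====
-- stated objective: faster
-- what changed: Instead of building every positive pairwise difference with two nested index loops and sorting that quadratic list, B sorts the input once and takes the minimum positive adjacent difference in one linear scan.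
-- outside the precondition, e.g. on obter_num_seguranca((0,)): A raises IndexError, B returns None
import Mathlib
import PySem

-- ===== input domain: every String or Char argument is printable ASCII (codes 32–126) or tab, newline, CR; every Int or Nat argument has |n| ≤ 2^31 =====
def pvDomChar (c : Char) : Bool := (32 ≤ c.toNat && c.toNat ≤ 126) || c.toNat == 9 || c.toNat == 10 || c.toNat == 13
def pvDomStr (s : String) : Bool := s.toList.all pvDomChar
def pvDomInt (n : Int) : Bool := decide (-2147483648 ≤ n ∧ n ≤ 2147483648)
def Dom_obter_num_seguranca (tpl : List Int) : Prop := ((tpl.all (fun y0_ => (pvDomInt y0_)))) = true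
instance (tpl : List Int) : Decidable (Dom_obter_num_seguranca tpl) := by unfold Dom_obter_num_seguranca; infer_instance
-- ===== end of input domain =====

-- B sorts once and scans adjacent pairs instead of building all positive pairwise
-- differences with nested loops and sorting them (objective: faster).

-- ===== PORT A =====
def obter_num_seguranca (tpl : List Int) : Int :=
  PySem.List.pyGetD (PySem.List.sorted (
    (PySem.List.pyRange 0 (tpl.length : Int) 1).foldl (fun sub i =>
      (PySem.List.pyRange 0 (tpl.length : Int) 1).foldl (fun sub j =>
        if PySem.List.pyGetD tpl i 0 - PySem.List.pyGetD tpl j 0 > 0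
        then sub ++ [PySem.List.pyGetD tpl i 0 - PySem.List.pyGetD tpl j 0]
        else sub) sub) [])
    (fun x => x) false) 0 0

-- ===== PORT B =====
def pvStep (best : Option Int) (p : Int × Int) : Option Int :=
  if 0 < p.2 - p.1 then
    match best with
    | none => some (p.2 - p.1)
    | some m => if p.2 - p.1 < m then some (p.2 - p.1) else some m
  else best

def obter_num_seguranca_alt (tpl : List Int) : Int :=
  (((PySem.List.sorted tpl (fun x => x) false).zip
      (PySem.List.slice (PySem.List.sorted tpl (fun x => x) false) (some 1) none)).foldl
    pvStep none).getD 0   -- Python B returns None when no positive difference exists; excluded by Pre_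

-- ===== PRECONDITION & SPEC =====
-- Pre_ excludes exactly the inputs with fewer than two distinct values, on which A
-- raises IndexError (sorted(sub)[0] on an empty tuple) and B returns None.
def Pre_obter_num_seguranca (tpl : List Int) : Prop :=
  ∃ x ∈ tpl, ∃ y ∈ tpl, x ≠ y
instance (tpl : List Int) : Decidable (Pre_obter_num_seguranca tpl) := by
  unfold Pre_obter_num_seguranca; infer_instance

def pvWitness_obter_num_seguranca : List Int := [3, 1]

def Spec_obter_num_seguranca (tpl : List Int) (out : Int) : Prop := out = obter_num_seguranca_alt tpl
instance (tpl : List Int) (out : Int) : Decidable (Spec_obter_num_seguranca tpl out) := by unfold Spec_obter_num_seguranca; infer_instance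

-- ===== CLAIM (what is proved, stated in full; the proofs are below) =====
def Claim_equal_obter_num_seguranca : Prop := ∀ (tpl : List Int), Dom_obter_num_seguranca tpl → Pre_obter_num_seguranca tpl → Spec_obter_num_seguranca tpl (obter_num_seguranca tpl)

-- ===== LEMMAS AND PROOFS =====

-- the multiset of positive pairwise differences A collects
def posDiffs (tpl : List Int) : List Int :=
  tpl.flatMap (fun a => (tpl.filter (fun b => a - b > 0)).map (fun b => a - b))

lemma mem_posDiffs {tpl : List Int} {x : Int} :
    x ∈ posDiffs tpl ↔ ∃ a ∈ tpl, ∃ b ∈ tpl, a - b > 0 ∧ a - b = x := by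
  simp [posDiffs]
  tauto

lemma portA_eq (tpl : List Int) :
    obter_num_seguranca tpl =
      PySem.List.pyGetD (PySem.List.sorted (posDiffs tpl) (fun x => x) false) 0 0 := by
  unfold obter_num_seguranca
  congr 2
  rw [PySem.List.foldl_congr_mem
    (g := fun (sub : List Int) (i : Int) =>
      sub ++ (tpl.filter (fun b => PySem.List.pyGetD tpl i 0 - b > 0)).map
        (fun b => PySem.List.pyGetD tpl i 0 - b))
    (h := by
      intro acc i _
      rw [PySem.List.foldl_pyRange_zero_pyGetD' tpl 0
        (fun (sub : List Int) (b : Int) =>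
          if PySem.List.pyGetD tpl i 0 - b > 0 then sub ++ [PySem.List.pyGetD tpl i 0 - b] else sub) acc]
      have := PySem.List.foldl_append_if
        (p := fun b => decide (PySem.List.pyGetD tpl i 0 - b > 0))
        (f := fun b => PySem.List.pyGetD tpl i 0 - b) tpl acc
      simpa using this)]
  rw [PySem.List.foldl_pyRange_zero_pyGetD' tpl 0
    (fun (sub : List Int) (a : Int) =>
      sub ++ (tpl.filter (fun b => a - b > 0)).map (fun b => a - b)) []]
  rw [PySem.List.foldl_append_eq_flatMap]
  rfl

-- B's fold is a running minimum over the positive adjacent differences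
def adjDiffs (L : List (Int × Int)) : List Int :=
  (L.filter (fun p => 0 < p.2 - p.1)).map (fun p => p.2 - p.1)

def pvMin (best : Option Int) (d : Int) : Option Int :=
  match best with
  | none => some d
  | some m => if d < m then some d else some m

lemma foldl_step_eq (L : List (Int × Int)) (acc : Option Int) :
    L.foldl pvStep acc = (adjDiffs L).foldl pvMin acc := by
  induction L generalizing acc with
  | nil => rfl
  | cons p t ih =>
    rw [List.foldl_cons, ih]
    unfold adjDiffs at ih ⊢
    rw [List.filter_cons]
    by_cases h : 0 < p.2 - p.1
    · simp only [h, decide_true, if_true, List.map_cons, List.foldl_cons]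
      congr 1
      simp only [pvStep, pvMin, if_pos h]
    · simp only [h, decide_false]
      congr 1
      simp only [pvStep, if_neg h]

lemma foldl_pvMin_some (l : List Int) (m : Int) :
    l.foldl pvMin (some m) = some (l.foldl min m) := by
  induction l generalizing m with
  | nil => rfl
  | cons x t ih =>
    rw [List.foldl_cons, List.foldl_cons]
    have h : pvMin (some m) x = some (min m x) := by
      show (if x < m then some x else some m) = some (min m x)
      rcases lt_or_ge x m with h | h
      · rw [if_pos h, min_eq_right h.le]
      · rw [if_neg (not_lt.mpr h), min_eq_left h]
    rw [h, ih]

lemma foldl_min_le (t : List Int) (m : Int) : t.foldl min m ≤ m := by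
  induction t generalizing m with
  | nil => simp
  | cons x s ih => exact le_trans (ih _) (min_le_left _ _)

lemma foldl_min_le_mem (t : List Int) (m : Int) : ∀ y ∈ t, t.foldl min m ≤ y := by
  induction t generalizing m with
  | nil => simp
  | cons x s ih =>
    intro y hy
    rcases List.mem_cons.mp hy with rfl | hy
    · exact le_trans (foldl_min_le s _) (min_le_right _ _)
    · exact ih _ y hy

lemma foldl_min_mem (t : List Int) (m : Int) : t.foldl min m = m ∨ t.foldl min m ∈ t := by
  induction t generalizing m with
  | nil => simp
  | cons x s ih =>
    rcases ih (min m x) with h | h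
    · rw [List.foldl_cons, h]
      rcases le_total m x with hx | hx
      · left; simp [hx]
      · right; simp [min_def]
        rcases eq_or_lt_of_le hx with rfl | hx
        · simp
        · simp [not_le.mpr hx]
    · right; exact List.mem_cons_of_mem _ h

lemma exists_adj_lt (s : List Int)
    (hm : ∀ p q : Nat, (hp : p < s.length) → (hq : q < s.length) → p ≤ q → s[p] ≤ s[q]) :
    ∀ q : Nat, (hq : q < s.length) → ∀ p : Nat, (hp : p < s.length) → p < q → s[p] < s[q] →
      ∃ k : Nat, ∃ hk : k + 1 < s.length, p ≤ k ∧ k + 1 ≤ q ∧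
        s[k]'(by omega) < s[k+1]'hk ∧ s[k+1]'hk - s[k]'(by omega) ≤ s[q] - s[p] := by
  intro q
  induction q with
  | zero => intro hq p hp hpq; omega
  | succ q ih =>
    intro hq p hp hpq hlt
    by_cases hpq' : p = q
    · subst hpq'
      exact ⟨p, hq, le_refl p, le_refl _, hlt, by omega⟩
    · have hq' : q < s.length := by omega
      by_cases hs : s[p] < s[q]
      · obtain ⟨k, hk, h1, h2, h3, h4⟩ := ih hq' p hp (by omega) hs
        have : s[q] ≤ s[q+1] := hm q (q+1) hq' hq (by omega)
        exact ⟨k, hk, h1, by omega, h3, by omega⟩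
      · have h1 : s[p] ≤ s[q] := hm p q hp hq' (by omega)
        have h2 : s[p] = s[q] := le_antisymm h1 (not_lt.mp hs)
        exact ⟨q, hq, by omega, le_refl _, by omega, by omega⟩

-- adjacent positive differences of the sorted list bound every positive pairwise difference
lemma adj_le_of_mem_posDiffs (tpl : List Int) :
    ∀ x ∈ posDiffs tpl,
      ∃ d ∈ adjDiffs ((PySem.List.sorted tpl (fun x => x) false).zip
          (PySem.List.sorted tpl (fun x => x) false).tail), d ≤ x := by
  intro x hx
  obtain ⟨a, ha, b, hb, hpos, hab⟩ := mem_posDiffs.mp hx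
  have ha' : a ∈ PySem.List.sorted tpl (fun x => x) false :=
    (PySem.List.mem_sorted tpl _ false a).mpr ha
  have hb' : b ∈ PySem.List.sorted tpl (fun x => x) false :=
    (PySem.List.mem_sorted tpl _ false b).mpr hb
  obtain ⟨q, hq, hqa⟩ := List.getElem_of_mem ha'
  obtain ⟨p, hp, hpb⟩ := List.getElem_of_mem hb'
  have hm : ∀ p q : Nat, (hp : p < (PySem.List.sorted tpl (fun x => x) false).length) →
      (hq : q < (PySem.List.sorted tpl (fun x => x) false).length) → p ≤ q →
      (PySem.List.sorted tpl (fun x => x) false)[p] ≤ (PySem.List.sorted tpl (fun x => x) false)[q] := by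
    intro p q hp hq hpq
    exact PySem.List.sorted_id_getElem_mono tpl hpq hq
  have hpq : p < q := by
    by_contra hc
    have := hm q p hq hp (by omega)
    rw [hqa, hpb] at this
    omega
  have hlt : (PySem.List.sorted tpl (fun x => x) false)[p] <
      (PySem.List.sorted tpl (fun x => x) false)[q] := by rw [hqa, hpb]; omega
  obtain ⟨k, hk, h1, h2, h3, h4⟩ := exists_adj_lt _ hm q hq p hp hpq hlt
  refine ⟨(PySem.List.sorted tpl (fun x => x) false)[k+1] -
          (PySem.List.sorted tpl (fun x => x) false)[k]'(by omega), ?_, ?_⟩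
  · unfold adjDiffs
    have hklen : k < ((PySem.List.sorted tpl (fun x => x) false).zip
        (PySem.List.sorted tpl (fun x => x) false).tail).length := by
      rw [List.length_zip, List.length_tail]; omega
    have hpair : ((PySem.List.sorted tpl (fun x => x) false)[k]'(by omega),
        (PySem.List.sorted tpl (fun x => x) false)[k+1]) ∈
        (PySem.List.sorted tpl (fun x => x) false).zip
          (PySem.List.sorted tpl (fun x => x) false).tail := by
      have := List.getElem_mem hklen
      rwa [List.getElem_zip, List.getElem_tail] at this
    refine List.mem_map.mpr ⟨_, List.mem_filter.mpr ⟨hpair, ?_⟩, rfl⟩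
    simpa using h3
  · rw [hqa, hpb] at h4; omega

-- every adjacent positive difference is a positive pairwise difference
lemma adjDiffs_subset_posDiffs (tpl : List Int) :
    ∀ d ∈ adjDiffs ((PySem.List.sorted tpl (fun x => x) false).zip
        (PySem.List.sorted tpl (fun x => x) false).tail), d ∈ posDiffs tpl := by
  intro d hd
  unfold adjDiffs at hd
  obtain ⟨pr, hpr, rfl⟩ := List.mem_map.mp hd
  obtain ⟨hmem, hposb⟩ := List.mem_filter.mp hpr
  obtain ⟨h1, h2⟩ := List.of_mem_zip (show (pr.1, pr.2) ∈ _ from by simpa using hmem)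
  have h2' : pr.2 ∈ PySem.List.sorted tpl (fun x => x) false := List.mem_of_mem_tail h2
  refine mem_posDiffs.mpr ⟨pr.2, (PySem.List.mem_sorted tpl _ false pr.2).mp h2',
    pr.1, (PySem.List.mem_sorted tpl _ false pr.1).mp h1, ?_, rfl⟩
  simpa using hposb

-- ===== VERDICT (by name: the statement is the Claim_ definition above) =====
theorem obter_num_seguranca_spec : Claim_equal_obter_num_seguranca := by
  intro tpl _ hpre
  unfold Spec_obter_num_seguranca
  -- A's result: head of the sorted list of all positive pairwise differences
  obtain ⟨a, ha, b, hb, hne⟩ := hpre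
  have hne' : posDiffs tpl ≠ [] := by
    rcases lt_or_gt_of_ne hne with h | h
    · exact List.ne_nil_of_mem (mem_posDiffs.mpr ⟨b, hb, a, ha, by omega, rfl⟩)
    · exact List.ne_nil_of_mem (mem_posDiffs.mpr ⟨a, ha, b, hb, by omega, rfl⟩)
  have hsne : PySem.List.sorted (posDiffs tpl) (fun x => x) false ≠ [] := by
    intro h; exact hne' ((PySem.List.sorted_eq_nil_iff _ _ _).mp h)
  rcases hcs : PySem.List.sorted (posDiffs tpl) (fun x => x) false with _ | ⟨m, t⟩
  · exact absurd hcs hsne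
  have hA : obter_num_seguranca tpl = m := by
    rw [portA_eq, hcs, PySem.List.pyGetD_zero_cons]
  have hm_mem : m ∈ posDiffs tpl := by
    have : m ∈ PySem.List.sorted (posDiffs tpl) (fun x => x) false := by
      rw [hcs]; exact List.mem_cons_self
    exact (PySem.List.mem_sorted _ _ _ m).mp this
  have hm_min : ∀ y ∈ posDiffs tpl, m ≤ y :=
    PySem.List.key_head_sorted_le (posDiffs tpl) (fun x => x) hcs
  -- B's result: running minimum over the adjacent positive differences of sorted(tpl)
  have hB : obter_num_seguranca_alt tpl =
      ((adjDiffs ((PySem.List.sorted tpl (fun x => x) false).zip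
        (PySem.List.sorted tpl (fun x => x) false).tail)).foldl pvMin none).getD 0 := by
    unfold obter_num_seguranca_alt
    rw [PySem.List.slice_from_one, foldl_step_eq]
  obtain ⟨d0, hd0, hd0le⟩ := adj_le_of_mem_posDiffs tpl m hm_mem
  rcases hD : adjDiffs ((PySem.List.sorted tpl (fun x => x) false).zip
      (PySem.List.sorted tpl (fun x => x) false).tail) with _ | ⟨d, ds⟩
  · rw [hD] at hd0; exact absurd hd0 (List.not_mem_nil)
  rw [hD] at hB
  rw [List.foldl_cons, show pvMin none d = some d from rfl, foldl_pvMin_some] at hB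
  simp only [Option.getD_some] at hB
  -- the two minima coincide
  have hb_mem : ds.foldl min d ∈ posDiffs tpl := by
    rcases foldl_min_mem ds d with h | h
    · rw [h]; exact adjDiffs_subset_posDiffs tpl d (by rw [hD]; exact List.mem_cons_self)
    · exact adjDiffs_subset_posDiffs tpl _ (by rw [hD]; exact List.mem_cons_of_mem _ h)
  have h1 : m ≤ ds.foldl min d := hm_min _ hb_mem
  have h2 : ds.foldl min d ≤ m := by
    rw [hD] at hd0
    rcases List.mem_cons.mp hd0 with rfl | h
    · exact le_trans (foldl_min_le ds _) hd0le
    · exact le_trans (foldl_min_le_mem ds d d0 h) hd0le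
  rw [hA, hB]
  omega
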